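-- pv_equiv track=rewrite | github.com/shreyas-shrestha/GTSF-Mentorship-Final-Project | models.py | _state_segments
-- ===== SOURCE A (Python) =====
-- def _state_segments(index, states):
--     if len(index) == 0:
--         return
--
--     start = index[0]
--     current_state = states[0]
--     for i in range(1, len(index)):
--         if states[i] != current_state:
--             yield start, index[i - 1], current_state
--             start = index[i]
--             current_state = states[i]
--     yield start, index[-1], current_state
-- ===== SOURCE B (Python) =====
-- def _state_segments(index, states):
--     n = len(index)
--     i = 0
--     while i < n:
--         s = states[i]
--         j = i
--         while j + 1 < n and states[j + 1] == s:
--             j += 1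
--         yield index[i], index[j], s
--         i = j + 1
-- ===== Notes on version B (the rewrite author's own statement) =====
-- stated objective: simpler
-- what changed: Replaces A's transition-detecting loop (carried start/current_state across iterations, segment ends via index[i-1] and index[-1]) by a nested run-scanner: an inner loop advances j to the end of the current run, the segment is emitted as (index[i], index[j], states[i]) and the outer loop jumps to j+1.
import Mathlib
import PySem

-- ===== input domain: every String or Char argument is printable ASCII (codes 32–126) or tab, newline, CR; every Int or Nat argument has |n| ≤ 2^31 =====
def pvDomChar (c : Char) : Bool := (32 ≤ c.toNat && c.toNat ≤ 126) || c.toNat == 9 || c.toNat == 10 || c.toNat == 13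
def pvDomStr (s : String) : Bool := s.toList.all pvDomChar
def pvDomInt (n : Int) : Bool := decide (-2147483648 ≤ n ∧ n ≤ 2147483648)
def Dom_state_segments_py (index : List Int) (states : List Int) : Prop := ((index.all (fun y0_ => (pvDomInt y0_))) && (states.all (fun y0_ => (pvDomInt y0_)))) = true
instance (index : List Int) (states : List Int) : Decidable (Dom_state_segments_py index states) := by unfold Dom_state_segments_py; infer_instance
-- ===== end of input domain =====

-- B replaces A's transition-detecting loop (carried start/current_state, end via index[i-1]/index[-1])
-- by a nested run-scanner: for each run start i, an inner loop advances j to the run's end, then it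
-- emits (index[i], index[j], states[i]) and jumps to j+1; objective: simpler decomposition, same O(n) cost.

-- ===== PORT A =====
-- A: fold over range(1, len(index)) carrying state (start, current_state, out); a yield appends to out.
def state_segments_py (index : List Int) (states : List Int) : List (Int × Int × Int) :=
  if index.length = 0 then []
  else
    let r :=
      (PySem.List.pyRange 1 (index.length : Int) 1).foldl
        (fun (s : Int × Int × List (Int × Int × Int)) i =>
          if PySem.List.pyGetD states i 0 ≠ s.2.1 then
            (PySem.List.pyGetD index i 0, PySem.List.pyGetD states i 0,
              s.2.2 ++ [(s.1, PySem.List.pyGetD index (i - 1) 0, s.2.1)])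
          else s)
        (PySem.List.pyGetD index 0 0, PySem.List.pyGetD states 0 0, [])
    r.2.2 ++ [(r.1, PySem.List.pyGetD index (-1) 0, r.2.1)]

-- ===== PORT B =====
-- inner while loop: advance j while j+1 < n and states[j+1] == s (fuel only makes it total)
def bInner (states : List Int) (n : Int) (s : Int) (j : Int) : Nat → Int
  | 0 => j
  | fuel + 1 =>
      if j + 1 < n ∧ PySem.List.pyGetD states (j + 1) 0 = s then
        bInner states n s (j + 1) fuel
      else j

-- outer while loop: i runs over run starts (fuel only makes it total)
def bOuter (index states : List Int) (n : Int) (i : Int) : Nat → List (Int × Int × Int)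
  | 0 => []
  | fuel + 1 =>
      if i < n then
        let s := PySem.List.pyGetD states i 0
        let j := bInner states n s i fuel
        (PySem.List.pyGetD index i 0, PySem.List.pyGetD index j 0, s)
          :: bOuter index states n (j + 1) fuel
      else []

def state_segments_py_alt (index : List Int) (states : List Int) : List (Int × Int × Int) :=
  bOuter index states (index.length : Int) 0 index.length

-- ===== PRECONDITION & SPEC =====
-- Pre_ excludes exactly the inputs where Python A raises IndexError: a nonempty index with
-- states shorter than index (states[i] is read for every i < len(index)).
def Pre_state_segments_py (index : List Int) (states : List Int) : Prop :=
  index = [] ∨ index.length ≤ states.length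
instance (index : List Int) (states : List Int) : Decidable (Pre_state_segments_py index states) := by unfold Pre_state_segments_py; infer_instance

def pvWitness_state_segments_py : List Int × List Int := ([1, 2, 3], [5, 5, 7])

def Spec_state_segments_py (index : List Int) (states : List Int) (out : List (Int × Int × Int)) : Prop := out = state_segments_py_alt index states
instance (index : List Int) (states : List Int) (out : List (Int × Int × Int)) : Decidable (Spec_state_segments_py index states out) := by unfold Spec_state_segments_py; infer_instance

-- ===== CLAIM (what is proved, stated in full; the proofs are below) =====
def Claim_equal_state_segments_py : Prop := ∀ (index : List Int) (states : List Int), Dom_state_segments_py index states → Pre_state_segments_py index states → Spec_state_segments_py index states (state_segments_py index states)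

-- ===== LEMMAS AND PROOFS =====

-- reference recursion both ports are reduced to: run started at p, q = last consumed position
def segsRef (index states : List Int) (p q : Int) : List Int → List (Int × Int × Int)
  | [] => [(PySem.List.pyGetD index p 0, PySem.List.pyGetD index q 0, PySem.List.pyGetD states p 0)]
  | i :: l =>
      if PySem.List.pyGetD states i 0 ≠ PySem.List.pyGetD states p 0 then
        (PySem.List.pyGetD index p 0, PySem.List.pyGetD index q 0, PySem.List.pyGetD states p 0)
          :: segsRef index states i i l
      else segsRef index states p i l

lemma bInner_bounds (states : List Int) (n s : Int) (fuel : Nat) :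
    ∀ j : Int, j ≤ bInner states n s j fuel ∧ (j < n → bInner states n s j fuel < n) := by
  induction fuel with
  | zero => intro j; simp [bInner]
  | succ fuel ih =>
      intro j
      simp only [bInner]
      split
      · rename_i h
        refine ⟨le_trans (by omega) (ih (j+1)).1, fun _ => (ih (j+1)).2 h.1⟩
      · simp

lemma bOuter_stop (index states : List Int) (n i : Int) (fuel : Nat) (h : ¬ i < n) :
    bOuter index states n i fuel = [] := by
  cases fuel <;> simp [bOuter, h]

lemma inner_segs (index states : List Int) (n p : Int) :
    ∀ (fuel : Nat) (j : Int), j < n → (n - 1 - j).toNat ≤ fuel →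
      segsRef index states p j (PySem.List.pyRange (j + 1) n 1)
      = (PySem.List.pyGetD index p 0,
         PySem.List.pyGetD index (bInner states n (PySem.List.pyGetD states p 0) j fuel) 0,
         PySem.List.pyGetD states p 0)
        :: (if bInner states n (PySem.List.pyGetD states p 0) j fuel + 1 < n then
              segsRef index states (bInner states n (PySem.List.pyGetD states p 0) j fuel + 1)
                (bInner states n (PySem.List.pyGetD states p 0) j fuel + 1)
                (PySem.List.pyRange (bInner states n (PySem.List.pyGetD states p 0) j fuel + 2) n 1)
            else []) := by
  intro fuel
  induction fuel with
  | zero =>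
      intro j hj hf
      have hjn : j = n - 1 := by omega
      subst hjn
      rw [PySem.List.pyRange_one_eq_nil (by omega)]
      simp [segsRef, bInner]
  | succ fuel ih =>
      intro j hj hf
      by_cases hlast : j + 1 < n
      · rw [PySem.List.pyRange_one_cons (by omega)]
        simp only [bInner, segsRef]
        by_cases hk : PySem.List.pyGetD states (j + 1) 0 = PySem.List.pyGetD states p 0
        · rw [if_neg (not_not_intro hk), if_pos ⟨hlast, hk⟩]
          have h2 : j + 1 + 1 = j + 2 := by ring
          have := ih (j + 1) hlast (by omega)
          simp only [h2] at this ⊢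
          exact this
        · rw [if_pos hk, if_neg (fun h => hk h.2), if_pos hlast]
          have h2 : j + 1 + 1 = j + 2 := by ring
          simp only [h2]
      · have hjn : j = n - 1 := by omega
        subst hjn
        rw [PySem.List.pyRange_one_eq_nil (by omega)]
        simp [segsRef, bInner]

lemma outer_segs (index states : List Int) (n : Int) :
    ∀ (fuel : Nat) (p : Int), p < n → (n - p).toNat ≤ fuel →
      bOuter index states n p fuel
      = segsRef index states p p (PySem.List.pyRange (p + 1) n 1) := by
  intro fuel
  induction fuel with
  | zero => intro p hp hf; omega
  | succ fuel ih =>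
      intro p hp hf
      simp only [bOuter, if_pos hp]
      rw [inner_segs index states n p fuel p hp (by omega)]
      congr 1
      by_cases hj : bInner states n (PySem.List.pyGetD states p 0) p fuel + 1 < n
      · rw [if_pos hj]
        have hb := bInner_bounds states n (PySem.List.pyGetD states p 0) fuel p
        rw [ih _ hj (by omega)]
        have h2 : ∀ b : Int, b + 1 + 1 = b + 2 := fun b => by ring
        rw [h2]
      · rw [if_neg hj, bOuter_stop _ _ _ _ _ hj]

lemma foldA_segs (index states : List Int) (n : Int) :
    ∀ (k : Nat) (a p : Int) (acc : List (Int × Int × Int)), 0 < a → a ≤ n → (n - a).toNat ≤ k →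
      (let r :=
        (PySem.List.pyRange a n 1).foldl
          (fun (s : Int × Int × List (Int × Int × Int)) i =>
            if PySem.List.pyGetD states i 0 ≠ s.2.1 then
              (PySem.List.pyGetD index i 0, PySem.List.pyGetD states i 0,
                s.2.2 ++ [(s.1, PySem.List.pyGetD index (i - 1) 0, s.2.1)])
            else s)
          (PySem.List.pyGetD index p 0, PySem.List.pyGetD states p 0, acc)
       r.2.2 ++ [(r.1, PySem.List.pyGetD index (n - 1) 0, r.2.1)])
      = acc ++ segsRef index states p (a - 1) (PySem.List.pyRange a n 1) := by
  intro k
  induction k with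
  | zero =>
      intro a p acc ha han hk
      have : a = n := by omega
      subst this
      rw [PySem.List.pyRange_one_eq_nil (by omega)]
      simp [segsRef]
  | succ k ih =>
      intro a p acc ha han hk
      by_cases han' : a = n
      · subst han'
        rw [PySem.List.pyRange_one_eq_nil (by omega)]
        simp [segsRef]
      · rw [PySem.List.pyRange_one_cons (by omega)]
        simp only [List.foldl_cons, segsRef]
        by_cases hkey : PySem.List.pyGetD states a 0 = PySem.List.pyGetD states p 0
        · rw [if_neg (by simp [hkey]), if_neg (by simp [hkey])]
          have := ih (a + 1) p acc (by omega) (by omega) (by omega)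
          simpa using this
        · rw [if_pos (by simp [hkey]), if_pos (by simp [hkey])]
          have := ih (a + 1) a (acc ++ [(PySem.List.pyGetD index p 0, PySem.List.pyGetD index (a - 1) 0, PySem.List.pyGetD states p 0)]) (by omega) (by omega) (by omega)
          simp only [add_sub_cancel_right] at this
          simpa [List.append_assoc] using this

lemma neg_one_idx (index : List Int) (h : index ≠ []) :
    PySem.List.pyGetD index (-1) 0 = PySem.List.pyGetD index ((index.length : Int) - 1) 0 := by
  have h1 : 0 < index.length := List.length_pos_iff.mpr h
  rw [PySem.List.pyGetD_neg_ofNat index 1 0 (by omega) (by omega)]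
  rw [PySem.List.pyGetD_eq_getElem (xs := index) (i := (index.length : Int) - 1) (d := 0)
        (by omega) (by omega)]
  congr 1
  omega

-- ===== VERDICT (by name: the statement is the Claim_ definition above) =====
theorem state_segments_py_spec : Claim_equal_state_segments_py := by
  intro index states _ _
  unfold Spec_state_segments_py
  by_cases h : index = []
  · subst h
    simp [state_segments_py, state_segments_py_alt, bOuter]
  · have hn : 0 < index.length := List.length_pos_iff.mpr h
    unfold state_segments_py state_segments_py_alt
    rw [if_neg (by omega)]
    simp only [neg_one_idx index h]
    have hA := foldA_segs index states (index.length : Int)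
      (((index.length : Int) - 1).toNat) 1 0 [] (by omega) (by omega) (by omega)
    simp only [] at hA
    rw [hA]
    rw [outer_segs index states (index.length : Int) index.length 0 (by omega) (by omega)]
    norm_num
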